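-- pv_equiv track=rewrite | github.com/Fondamenti18/fondamenti-di-programmazione | students/1710554/homework02/program03.py | scarta
-- ===== SOURCE A (Python) =====
-- def scarta(linea, codice):
--     linea = list(linea)
--     codice = list(codice)
--     for a,b in zip(linea, codice):
--         for l,c in zip(linea, codice):
--             if a == l:
--                 if b == c:
--                     continue
--                 else:
--                     return False
--             else:
--                 if b != c:
--                     continue
--                 else:
--                     return False
--     return True
-- ===== SOURCE B (Python) =====
-- def scarta(linea, codice):
--     fwd = {}
--     bwd = {}
--     for a, b in zip(linea, codice):
--         if fwd.get(a, b) != b: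
--             return False
--         if bwd.get(b, a) != a:
--             return False
--         fwd.setdefault(a, b)
--         bwd.setdefault(b, a)
--     return True
-- ===== Notes on version B (the rewrite author's own statement) =====
-- stated objective: faster
-- what changed: Replaced the quadratic all-pairs scan (for each position, rescan every position checking equality patterns agree) by a single pass maintaining a forward and a backward dictionary of the character correspondence and rejecting on the first inconsistency.
import Mathlib
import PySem

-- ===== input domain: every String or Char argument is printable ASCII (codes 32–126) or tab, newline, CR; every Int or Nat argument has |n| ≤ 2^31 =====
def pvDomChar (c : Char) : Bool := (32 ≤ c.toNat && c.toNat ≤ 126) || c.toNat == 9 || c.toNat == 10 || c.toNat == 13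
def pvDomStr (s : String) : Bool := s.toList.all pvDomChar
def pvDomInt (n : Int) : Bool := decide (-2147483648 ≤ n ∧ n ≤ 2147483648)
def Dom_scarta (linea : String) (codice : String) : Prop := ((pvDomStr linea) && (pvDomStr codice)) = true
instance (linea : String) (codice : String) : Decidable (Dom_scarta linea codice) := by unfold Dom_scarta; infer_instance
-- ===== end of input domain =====

-- B replaces A's quadratic all-pairs consistency scan by one linear pass with two dictionaries (forward and backward character correspondence).

-- ===== PORT A =====
-- inner 'for l,c in zip(...)' loop of A, for a fixed outer pair (a,b)
def scartaInner (a b : Char) : List (Char × Char) → Bool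
  | [] => true
  | (l, c) :: rest =>
    if a = l then
      if b = c then scartaInner a b rest else false
    else
      if b ≠ c then scartaInner a b rest else false

-- outer 'for a,b in zip(...)' loop of A
def scartaOuter : List (Char × Char) → List (Char × Char) → Bool
  | _, [] => true
  | ps, (a, b) :: rest =>
    if scartaInner a b ps then scartaOuter ps rest else false

def scarta (linea : String) (codice : String) : Bool :=
  scartaOuter (linea.toList.zip codice.toList) (linea.toList.zip codice.toList)

-- ===== PORT B =====
-- single pass of Source B carrying the forward and backward dictionaries
def scartaAltLoop : List (Char × Char) → PySem.Dict Char Char → PySem.Dict Char Char → Bool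
  | [], _, _ => true
  | (a, b) :: rest, fwd, bwd =>
    if fwd.getD a b ≠ b then false
    else if bwd.getD b a ≠ a then false
    else scartaAltLoop rest (fwd.setdefault a b) (bwd.setdefault b a)

def scarta_alt (linea : String) (codice : String) : Bool :=
  scartaAltLoop (linea.toList.zip codice.toList) PySem.Dict.empty PySem.Dict.empty

-- ===== PRECONDITION & SPEC =====
def Spec_scarta (linea : String) (codice : String) (out : Bool) : Prop := out = scarta_alt linea codice
instance (linea : String) (codice : String) (out : Bool) : Decidable (Spec_scarta linea codice out) := by unfold Spec_scarta; infer_instance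

-- ===== CLAIM (what is proved, stated in full; the proofs are below) =====
def Claim_equal_scarta : Prop := ∀ (linea : String) (codice : String), Dom_scarta linea codice → Spec_scarta linea codice (scarta linea codice)

-- ===== LEMMAS AND PROOFS =====

-- the common semantic characterisation: equality patterns of the two components agree on all pairs
def ConsA (ps : List (Char × Char)) : Prop :=
  ∀ p ∈ ps, ∀ q ∈ ps, (p.1 = q.1 ↔ p.2 = q.2)

-- first-occurrence consistency of one pair against an already-seen prefix
def FOk (seen : List (Char × Char)) (p : Char × Char) : Prop :=
  (∀ q ∈ seen.find? (fun r => r.1 == p.1), q.2 = p.2) ∧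
  (∀ q ∈ seen.find? (fun r => r.2 == p.2), q.1 = p.1)

def OKall : List (Char × Char) → List (Char × Char) → Prop
  | _, [] => True
  | seen, p :: rest => FOk seen p ∧ OKall (seen ++ [p]) rest

lemma scartaInner_iff (a b : Char) (ps : List (Char × Char)) :
    scartaInner a b ps = true ↔ ∀ q ∈ ps, (a = q.1 ↔ b = q.2) := by
  induction ps with
  | nil => simp [scartaInner]
  | cons p rest ih =>
    obtain ⟨l, c⟩ := p
    simp only [scartaInner]
    by_cases hal : a = l
    · subst hal
      by_cases hbc : b = c
      · subst hbc
        rw [if_pos rfl, if_pos rfl, ih]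
        constructor
        · intro h q hq
          rcases List.mem_cons.mp hq with rfl | hq'
          · simp
          · exact h q hq'
        · intro h q hq; exact h q (List.mem_cons_of_mem _ hq)
      · rw [if_pos rfl, if_neg hbc]
        simp only [Bool.false_eq_true, false_iff]
        intro h
        exact hbc ((h (a, c) List.mem_cons_self).mp rfl)
    · by_cases hbc : b = c
      · subst hbc
        rw [if_neg hal, if_neg (not_not_intro rfl)]
        simp only [Bool.false_eq_true, false_iff]
        intro h
        exact hal ((h (l, b) List.mem_cons_self).mpr rfl)
      · rw [if_neg hal, if_pos hbc, ih]
        constructor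
        · intro h q hq
          rcases List.mem_cons.mp hq with rfl | hq'
          · exact ⟨fun h' => absurd h' hal, fun h' => absurd h' hbc⟩
          · exact h q hq'
        · intro h q hq; exact h q (List.mem_cons_of_mem _ hq)

lemma scartaOuter_iff (ps qs : List (Char × Char)) :
    scartaOuter ps qs = true ↔ ∀ p ∈ qs, ∀ q ∈ ps, (p.1 = q.1 ↔ p.2 = q.2) := by
  induction qs with
  | nil => simp [scartaOuter]
  | cons p rest ih =>
    obtain ⟨a, b⟩ := p
    simp only [scartaOuter]
    by_cases h : scartaInner a b ps = true
    · rw [if_pos h, ih]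
      constructor
      · intro hr q hq
        rcases List.mem_cons.mp hq with rfl | hq'
        · exact fun r hr' => (scartaInner_iff a b ps).mp h r hr'
        · exact hr q hq'
      · intro hall q hq; exact hall q (List.mem_cons_of_mem _ hq)
    · rw [if_neg h]
      simp only [Bool.false_eq_true, false_iff]
      intro hall
      exact h ((scartaInner_iff a b ps).mpr (fun q hq => hall (a, b) List.mem_cons_self q hq))

lemma scarta_iff_ConsA (linea codice : String) :
    scarta linea codice = true ↔ ConsA (linea.toList.zip codice.toList) := by
  simp [scarta, scartaOuter_iff, ConsA]

-- invariant transfer: one setdefault step keeps the forward dictionary equal to first-occurrence lookup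
lemma inv_fst_step (seen : List (Char × Char)) (a b : Char) (fwd : PySem.Dict Char Char)
    (hf : ∀ x, fwd.get? x = (seen.find? (fun r => r.1 == x)).map Prod.snd) :
    ∀ x, (fwd.setdefault a b).get? x
      = ((seen ++ [(a, b)]).find? (fun r => r.1 == x)).map Prod.snd := by
  intro x
  rw [List.find?_append]
  cases hF : seen.find? (fun r => r.1 == a) with
  | some q =>
    have hcont : fwd.contains a = true := by
      rw [PySem.Dict.contains_eq_isSome_get?, hf a, hF]; rfl
    rw [PySem.Dict.setdefault_of_contains _ _ hcont, hf x]
    cases hx : seen.find? (fun r => r.1 == x) with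
    | some _ => rfl
    | none =>
      have hax : (((a, b) : Char × Char).1 == x) = false := by
        simp only [beq_eq_false_iff_ne, ne_eq]
        intro h; rw [h] at hF; rw [hF] at hx; exact Option.some_ne_none q hx
      simp [List.find?, hax]
  | none =>
    have hcont : fwd.contains a = false := by
      rw [PySem.Dict.contains_eq_isSome_get?, hf a, hF]; rfl
    rw [PySem.Dict.setdefault_of_not_contains _ _ hcont, PySem.Dict.get?_insert, hf x]
    by_cases hx' : x = a
    · subst hx'; rw [hF]; simp [List.find?]
    · rw [if_neg hx']
      cases hx : seen.find? (fun r => r.1 == x) with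
      | some _ => rfl
      | none =>
        have hax : (((a, b) : Char × Char).1 == x) = false := by
          simp only [beq_eq_false_iff_ne, ne_eq]
          exact fun h => hx' h.symm
        simp [List.find?, hax]

-- the same for the backward dictionary
lemma inv_snd_step (seen : List (Char × Char)) (a b : Char) (bwd : PySem.Dict Char Char)
    (hb : ∀ y, bwd.get? y = (seen.find? (fun r => r.2 == y)).map Prod.fst) :
    ∀ y, (bwd.setdefault b a).get? y
      = ((seen ++ [(a, b)]).find? (fun r => r.2 == y)).map Prod.fst := by
  intro y
  rw [List.find?_append]
  cases hB : seen.find? (fun r => r.2 == b) with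
  | some q =>
    have hcont : bwd.contains b = true := by
      rw [PySem.Dict.contains_eq_isSome_get?, hb b, hB]; rfl
    rw [PySem.Dict.setdefault_of_contains _ _ hcont, hb y]
    cases hy : seen.find? (fun r => r.2 == y) with
    | some _ => rfl
    | none =>
      have hby : (((a, b) : Char × Char).2 == y) = false := by
        simp only [beq_eq_false_iff_ne, ne_eq]
        intro h; rw [h] at hB; rw [hB] at hy; exact Option.some_ne_none q hy
      simp [List.find?, hby]
  | none =>
    have hcont : bwd.contains b = false := by
      rw [PySem.Dict.contains_eq_isSome_get?, hb b, hB]; rfl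
    rw [PySem.Dict.setdefault_of_not_contains _ _ hcont, PySem.Dict.get?_insert, hb y]
    by_cases hy' : y = b
    · subst hy'; rw [hB]; simp [List.find?]
    · rw [if_neg hy']
      cases hy : seen.find? (fun r => r.2 == y) with
      | some _ => rfl
      | none =>
        have hby : (((a, b) : Char × Char).2 == y) = false := by
          simp only [beq_eq_false_iff_ne, ne_eq]
          exact fun h => hy' h.symm
        simp [List.find?, hby]

lemma scartaAltLoop_iff (rest : List (Char × Char)) :
    ∀ (seen : List (Char × Char)) (fwd bwd : PySem.Dict Char Char),
    (∀ x, fwd.get? x = (seen.find? (fun r => r.1 == x)).map Prod.snd) →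
    (∀ y, bwd.get? y = (seen.find? (fun r => r.2 == y)).map Prod.fst) →
    (scartaAltLoop rest fwd bwd = true ↔ OKall seen rest) := by
  induction rest with
  | nil => intro seen fwd bwd _ _; simp [scartaAltLoop, OKall]
  | cons p rest ih =>
    intro seen fwd bwd hf hb
    obtain ⟨a, b⟩ := p
    have hgf : fwd.getD a b = ((seen.find? (fun r => r.1 == a)).map Prod.snd).getD b := by
      rw [PySem.Dict.getD_eq_get?_getD, hf a]
    have hgb : bwd.getD b a = ((seen.find? (fun r => r.2 == b)).map Prod.fst).getD a := by
      rw [PySem.Dict.getD_eq_get?_getD, hb b]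
    simp only [scartaAltLoop]
    by_cases hc1 : fwd.getD a b = b
    · rw [if_neg (not_not_intro hc1)]
      by_cases hc2 : bwd.getD b a = a
      · rw [if_neg (not_not_intro hc2),
          ih (seen ++ [(a, b)]) _ _ (inv_fst_step seen a b fwd hf) (inv_snd_step seen a b bwd hb)]
        have hFOk : FOk seen (a, b) := by
          constructor
          · intro q hq
            rw [Option.mem_def.mp hq] at hgf
            exact hgf.symm.trans hc1
          · intro q hq
            rw [Option.mem_def.mp hq] at hgb
            exact hgb.symm.trans hc2
        simp only [OKall]
        exact ⟨fun h => ⟨hFOk, h⟩, fun h => h.2⟩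
      · rw [if_pos hc2]
        simp only [OKall, Bool.false_eq_true, false_iff]
        rintro ⟨⟨_, h2⟩, _⟩
        cases hB : seen.find? (fun r => r.2 == b) with
        | some q => exact hc2 (by rw [hgf] at hc1; rw [hgb, hB]; exact h2 q (by simp [hB]))
        | none => exact hc2 (by rw [hgb, hB]; rfl)
    · rw [if_pos hc1]
      simp only [OKall, Bool.false_eq_true, false_iff]
      rintro ⟨⟨h1, _⟩, _⟩
      cases hF : seen.find? (fun r => r.1 == a) with
      | some q => exact hc1 (by rw [hgf, hF]; exact h1 q (by simp [hF]))
      | none => exact hc1 (by rw [hgf, hF]; rfl)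

lemma scarta_alt_iff_OKall (linea codice : String) :
    scarta_alt linea codice = true ↔ OKall [] (linea.toList.zip codice.toList) := by
  exact scartaAltLoop_iff _ [] _ _ (fun x => by simp [PySem.Dict.get?_empty])
    (fun y => by simp [PySem.Dict.get?_empty])

lemma OKall_iff_idx (rest : List (Char × Char)) :
    ∀ seen, OKall seen rest ↔ ∀ i (h : i < rest.length), FOk (seen ++ rest.take i) rest[i] := by
  induction rest with
  | nil => intro seen; simp [OKall]
  | cons p rest ih =>
    intro seen
    simp only [OKall, ih (seen ++ [p])]
    constructor
    · rintro ⟨h0, hrest⟩ i hi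
      cases i with
      | zero => simpa using h0
      | succ j =>
        have := hrest j (by simpa using hi)
        simpa [List.append_assoc] using this
    · intro h
      refine ⟨by simpa using h 0 (by simp), fun j hj => ?_⟩
      have := h (j + 1) (by simpa using hj)
      simpa [List.append_assoc] using this

-- from first-occurrence consistency at every index: find? on take (i+1) always succeeds consistently
lemma find_take_succ_fst (ps : List (Char × Char))
    (H : ∀ i (h : i < ps.length), FOk (ps.take i) ps[i]) (i : Nat) (hi : i < ps.length) :
    ∃ q, (ps.take (i + 1)).find? (fun r => r.1 == ps[i].1) = some q ∧ q.2 = ps[i].2 := by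
  have htake : ps.take (i + 1) = ps.take i ++ [ps[i]] := by
    rw [List.take_add_one, List.getElem?_eq_getElem hi]; rfl
  rw [htake, List.find?_append]
  cases hf : (ps.take i).find? (fun r => r.1 == ps[i].1) with
  | some q => exact ⟨q, rfl, (H i hi).1 q (by simp [hf])⟩
  | none => exact ⟨ps[i], by simp [List.find?], rfl⟩

lemma find_take_succ_snd (ps : List (Char × Char))
    (H : ∀ i (h : i < ps.length), FOk (ps.take i) ps[i]) (i : Nat) (hi : i < ps.length) :
    ∃ q, (ps.take (i + 1)).find? (fun r => r.2 == ps[i].2) = some q ∧ q.1 = ps[i].1 := by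
  have htake : ps.take (i + 1) = ps.take i ++ [ps[i]] := by
    rw [List.take_add_one, List.getElem?_eq_getElem hi]; rfl
  rw [htake, List.find?_append]
  cases hf : (ps.take i).find? (fun r => r.2 == ps[i].2) with
  | some q => exact ⟨q, rfl, (H i hi).2 q (by simp [hf])⟩
  | none => exact ⟨ps[i], by simp [List.find?], rfl⟩

lemma find_take_mono {α : Type} (ps : List α) (p : α → Bool) {i j : Nat} (hij : i ≤ j)
    {q : α} (h : (ps.take (i + 1)).find? p = some q) :
    (ps.take (j + 1)).find? p = some q := by
  have hsplit : ps.take (j + 1) = ps.take (i + 1) ++ (ps.drop (i + 1)).take (j - i) := by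
    rw [← List.take_add]; congr 1; omega
  rw [hsplit, List.find?_append, h]; rfl

-- chained first-occurrence argument, for indices i ≤ j
lemma fst_chain (ps : List (Char × Char))
    (H : ∀ i (h : i < ps.length), FOk (ps.take i) ps[i])
    {i j : Nat} (hi : i < ps.length) (hj : j < ps.length) (hij : i ≤ j)
    (h1 : ps[i].1 = ps[j].1) : ps[i].2 = ps[j].2 := by
  obtain ⟨q, hqf, hq2⟩ := find_take_succ_fst ps H i hi
  obtain ⟨q', hqf', hq2'⟩ := find_take_succ_fst ps H j hj
  rw [← h1] at hqf'
  rw [find_take_mono ps _ hij hqf] at hqf'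
  rw [← hq2, Option.some.inj hqf', hq2']

lemma snd_chain (ps : List (Char × Char))
    (H : ∀ i (h : i < ps.length), FOk (ps.take i) ps[i])
    {i j : Nat} (hi : i < ps.length) (hj : j < ps.length) (hij : i ≤ j)
    (h2 : ps[i].2 = ps[j].2) : ps[i].1 = ps[j].1 := by
  obtain ⟨q, hqf, hq1⟩ := find_take_succ_snd ps H i hi
  obtain ⟨q', hqf', hq1'⟩ := find_take_succ_snd ps H j hj
  rw [← h2] at hqf'
  rw [find_take_mono ps _ hij hqf] at hqf'
  rw [← hq1, Option.some.inj hqf', hq1']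

lemma OKall_nil_iff_ConsA (ps : List (Char × Char)) : OKall [] ps ↔ ConsA ps := by
  rw [OKall_iff_idx ps []]
  simp only [List.nil_append]
  constructor
  · intro H p hp q hq
    obtain ⟨i, hi, rfl⟩ := List.mem_iff_getElem.mp hp
    obtain ⟨j, hj, rfl⟩ := List.mem_iff_getElem.mp hq
    rcases Nat.le_total i j with hij | hij
    · exact ⟨fst_chain ps H hi hj hij, snd_chain ps H hi hj hij⟩
    · exact ⟨fun h => (fst_chain ps H hj hi hij h.symm).symm,
             fun h => (snd_chain ps H hj hi hij h.symm).symm⟩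
  · intro H i hi
    constructor
    · intro q hq
      have hpred := List.find?_some (Option.mem_def.mp hq)
      have hmem : q ∈ ps := List.mem_of_mem_take (List.mem_of_find?_eq_some (Option.mem_def.mp hq))
      exact (H q hmem ps[i] (List.getElem_mem hi)).mp (by simpa using hpred)
    · intro q hq
      have hpred := List.find?_some (Option.mem_def.mp hq)
      have hmem : q ∈ ps := List.mem_of_mem_take (List.mem_of_find?_eq_some (Option.mem_def.mp hq))
      exact (H q hmem ps[i] (List.getElem_mem hi)).mpr (by simpa using hpred)

-- ===== VERDICT (by name: the statement is the Claim_ definition above) =====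
theorem scarta_spec : Claim_equal_scarta := by
  intro linea codice _
  unfold Spec_scarta
  rw [Bool.eq_iff_iff, scarta_iff_ConsA, scarta_alt_iff_OKall, OKall_nil_iff_ConsA]
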